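-- pv_equiv track=rewrite | github.com/mohi-othman/mohi-euler-python | ProjectEuler/ProjectEuler/Euler078.py | Solve
-- ===== SOURCE A (Python) =====
-- def Solve(divisor):
--     q = []
--     for i in range(1,500):
--         x = i
--         q.append(int(x*(3*x - 1)/2))
--         x = -i
--         q.append(int(x*(3*x - 1)/2))
--
--     q.sort()
--
--     n = 1
--     P = [1]
--     r = 0
--     while True:
--         i = 0
--         f = -1
--         r = 0
--         while q[i]<=n:
--             if i%2==0: f = -f
--             r+= f * P[n-q[i]]
--             i+=1
--         P.append(r)
--         if r % divisor == 0:
--             break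
--         n+=1
--
--     return (n,r)
-- ===== SOURCE B (Python) =====
-- def Solve(divisor):
--     # No pentagonal number is generated or stored. An offset g contributes to p(n)
--     # exactly when 24*g+1 is an odd perfect square s*s; B enumerates the candidate
--     # roots s = 5, 7, 9, ... directly, keeps those with 24 | s*s-1, and inverts
--     # g = (s*s-1)//24; the index is k = (s+1)//6 (s = 6k-1 or 6k+1) and the sign
--     # is (-1)**(k+1).
--     P = [1]
--     n = 1
--     while True:
--         r = 0
--         s = 5
--         while s * s <= 24 * n + 1:
--             if (s * s - 1) % 24 == 0:
--                 g = (s * s - 1) // 24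
--                 if ((s + 1) // 6) % 2 == 1:
--                     r += P[n - g]
--                 else:
--                     r -= P[n - g]
--             s += 2
--         P.append(r)
--         if r % divisor == 0:
--             return (n, r)
--         n += 1
-- ===== Notes on version B (the rewrite author's own statement) =====
-- stated objective: alternative
-- what changed: B eliminates A's precomputed sorted pentagonal table and its parity-indexed walk: it enumerates candidate odd square roots s = 5,7,9,... of 24g+1, keeps those with 24 | s*s-1 (exactly the generalized pentagonal offsets g = (s*s-1)//24), and computes index and sign directly from the root as k = (s+1)//6, (-1)**(k+1).
import Mathlib
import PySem

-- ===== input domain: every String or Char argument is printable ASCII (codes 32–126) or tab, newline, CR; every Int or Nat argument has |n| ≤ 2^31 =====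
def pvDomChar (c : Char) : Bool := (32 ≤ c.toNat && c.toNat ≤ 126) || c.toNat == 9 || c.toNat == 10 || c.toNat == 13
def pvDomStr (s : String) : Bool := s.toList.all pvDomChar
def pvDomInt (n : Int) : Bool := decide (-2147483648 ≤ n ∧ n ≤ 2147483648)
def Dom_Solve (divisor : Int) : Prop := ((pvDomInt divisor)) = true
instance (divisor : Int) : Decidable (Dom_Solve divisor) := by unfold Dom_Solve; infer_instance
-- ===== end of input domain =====

-- B replaces A's precomputed sorted pentagonal table and its parity-indexed walk by an
-- enumeration of candidate odd square roots s of 24g+1 behind the filter 24 | s*s-1, inverting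
-- the offset g = (s*s-1)//24 and computing index and sign from the root (objective: alternative
-- algorithm, not claimed faster).
-- Both outer 'while True' loops are ported with fuel 373750, the capacity of A's precomputed
-- table (past it Python A raises IndexError); wherever Python A returns, n stays within it.

-- ===== PORT A =====
-- q building loop: int(x*(3*x-1)/2) is exact integer division here (the product is even and
-- nonnegative, and small enough that float division is exact); ported as floordiv.
def buildQ : List Int :=
  (PySem.List.pyRange 1 500 1).foldl
    (fun q i =>
      let x : Int := i
      let q := q ++ [PySem.Int.floordiv (x * (3 * x - 1)) 2]
      let x : Int := -i
      q ++ [PySem.Int.floordiv (x * (3 * x - 1)) 2]) []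

def qSorted : List Int := PySem.List.sorted buildQ id false

-- inner 'while q[i] <= n' loop of A: structural recursion over the remaining tail of q,
-- still carrying the Python index i for the parity test; P[n-q[i]] via pyGet? (in range under
-- Pre_; .getD 0 is the totality default on the excluded inputs).
def walkA (n : Int) (P : List Int) : List Int → Int → Int → Int → Int
  | [], _, _, r => r   -- Python would raise IndexError here; unreachable (n ≤ 373750 < q.max)
  | x :: rest, i, f, r =>
      if x ≤ n then
        let f := if PySem.Int.mod i 2 == 0 then -f else f
        walkA n P rest (i + 1) f (r + f * (PySem.List.pyGet? P (n - x)).getD 0)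
      else r

def outerA (divisor : Int) (q : List Int) : Nat → Int → List Int → Int × Int
  | 0, n, _ => (n, 0)   -- fuel exhausted: A's table is out of range here (IndexError)
  | fuel + 1, n, P =>
      let r := walkA n P q 0 (-1) 0
      if PySem.Int.mod r divisor == 0 then (n, r)
      else outerA divisor q fuel (n + 1) (P ++ [r])

def Solve (divisor : Int) : Int × Int := outerA divisor qSorted 373750 1 [1]

-- ===== PORT B =====
-- 'while s*s <= 24*n+1' carrying the candidate root s and the accumulator r; the fuel
-- 12*n.toNat+1 is a totality guard only (s grows by 2 each step and the loop stops before
-- s*s exceeds 24*n+1).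
def innerB (n : Int) (P : List Int) : Nat → Int → Int → Int
  | 0, _, r => r
  | fuel + 1, s, r =>
      if s * s ≤ 24 * n + 1 then
        let r' :=
          if PySem.Int.mod (s * s - 1) 24 == 0 then
            (let g := PySem.Int.floordiv (s * s - 1) 24
             if PySem.Int.mod (PySem.Int.floordiv (s + 1) 6) 2 == 1 then
               r + (PySem.List.pyGet? P (n - g)).getD 0
             else
               r - (PySem.List.pyGet? P (n - g)).getD 0)
          else r
        innerB n P fuel (s + 2) r'
      else r

def outerB (divisor : Int) : Nat → Int → List Int → Int × Int
  | 0, n, _ => (n, 0)   -- fuel exhausted (same totality guard as port A)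
  | fuel + 1, n, P =>
      let r := innerB n P (12 * n.toNat + 1) 5 0
      if PySem.Int.mod r divisor == 0 then (n, r)
      else outerB divisor fuel (n + 1) (P ++ [r])

def Solve_alt (divisor : Int) : Int × Int := outerB divisor 373750 1 [1]

-- ===== PRECONDITION & SPEC =====
-- Pre_ excludes only divisor = 0, where Python A raises ZeroDivisionError (as does B).
def Pre_Solve (divisor : Int) : Prop := divisor ≠ 0
instance (divisor : Int) : Decidable (Pre_Solve divisor) := by unfold Pre_Solve; infer_instance
def pvWitness_Solve : Int := 7
def Spec_Solve (divisor : Int) (out : Int × Int) : Prop := out = Solve_alt divisor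
instance (divisor : Int) (out : Int × Int) : Decidable (Spec_Solve divisor out) := by unfold Spec_Solve; infer_instance

-- ===== CLAIM (what is proved, stated in full; the proofs are below) =====
def Claim_equal_Solve : Prop := ∀ (divisor : Int), Dom_Solve divisor → Pre_Solve divisor → Spec_Solve divisor (Solve divisor)

-- ===== LEMMAS AND PROOFS =====

-- proof-side names for the two generalized pentagonal numbers of index k
def gp1 (k : Int) : Int := PySem.Int.floordiv (k * (3 * k - 1)) 2
def gp2 (k : Int) : Int := PySem.Int.floordiv (k * (3 * k + 1)) 2

-- ghost middleman: the signed pentagonal sum generated per index k (A's walk and B's scan are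
-- each proved equal to it)
def sumK (n : Int) (P : List Int) : Nat → Int → Int → Int → Int
  | 0, _, _, r => r
  | fuel + 1, k, sign, r =>
      let g1 := PySem.Int.floordiv (k * (3 * k - 1)) 2
      if g1 > n then r
      else
        let r := r + sign * (PySem.List.pyGet? P (n - g1)).getD 0
        let g2 := PySem.Int.floordiv (k * (3 * k + 1)) 2
        let r := if g2 ≤ n then r + sign * (PySem.List.pyGet? P (n - g2)).getD 0 else r
        sumK n P fuel (k + 1) (-sign) r

-- the interleaved ascending list of pentagonal pairs starting at index k
def pairs : Int → Nat → List Int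
  | _, 0 => []
  | k, j + 1 => gp1 k :: gp2 k :: pairs (k + 1) j

-- the sign (-1)^(k+1)
def sgnK (k : Int) : Int := if PySem.Int.mod k 2 == 1 then 1 else -1

theorem floordiv_two_exact (a m : Int) (h : a = 2 * m) : PySem.Int.floordiv a 2 = m := by
  rw [h, PySem.Int.floordiv_eq_ediv_of_pos (by omega)]
  omega

theorem gp1_spec (k : Int) : 2 * gp1 k = 3 * k * k - k := by
  obtain ⟨m, hm⟩ := Int.even_mul_succ_self k
  unfold gp1
  rw [floordiv_two_exact _ (m + (k * k - k)) (by linear_combination hm)]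
  linear_combination -hm

theorem gp2_spec (k : Int) : 2 * gp2 k = 3 * k * k + k := by
  obtain ⟨m, hm⟩ := Int.even_mul_succ_self k
  unfold gp2
  rw [floordiv_two_exact _ (m + k * k) (by linear_combination hm)]
  linear_combination -hm

theorem gp1_lt_gp2 (k : Int) (hk : 1 ≤ k) : gp1 k < gp2 k := by
  have h1 := gp1_spec k; have h2 := gp2_spec k; linarith

theorem gp2_lt_gp1_succ (k : Int) (hk : 1 ≤ k) : gp2 k < gp1 (k + 1) := by
  have h1 := gp2_spec k
  have h2 : 2 * gp1 (k + 1) = 3 * k * k + 5 * k + 2 := by linear_combination gp1_spec (k + 1)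
  linarith

theorem k_le_gp1 (k : Int) (hk : 1 ≤ k) : k ≤ gp1 k := by
  have h1 := gp1_spec k; nlinarith

theorem flatMap_pairs : ∀ (j : Nat) (k : Int),
    (PySem.List.pyRange k (k + j) 1).flatMap (fun i => [gp1 i, gp2 i]) = pairs k j := by
  intro j
  induction j with
  | zero => intro k; simp [PySem.List.pyRange_one_eq_nil, pairs]
  | succ j ih =>
      intro k
      rw [PySem.List.pyRange_one_cons (by push_cast; omega)]
      have harg : k + ((j : Nat) + 1 : Nat) = (k + 1) + (j : Int) := by push_cast; ring
      rw [harg]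
      simp only [List.flatMap_cons, ih (k + 1), pairs]
      rfl

theorem buildQ_eq_pairs : buildQ = pairs 1 499 := by
  have hbody : buildQ = (PySem.List.pyRange 1 500 1).foldl (fun q i => q ++ [gp1 i, gp2 i]) [] := by
    unfold buildQ
    congr 1
    funext q i
    have h : (-i) * (3 * (-i) - 1) = i * (3 * i + 1) := by ring
    simp only [h, List.append_assoc]
    rfl
  rw [hbody, PySem.List.foldl_append_eq_flatMap]
  have h500 : (500 : Int) = 1 + ((499 : Nat) : Int) := by norm_num
  rw [h500, flatMap_pairs 499 1]
  rfl

theorem pairs_sorted_lb : ∀ (j : Nat) (k : Int), 1 ≤ k →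
    (pairs k j).Pairwise (· < ·) ∧ ∀ x ∈ pairs k j, gp1 k ≤ x := by
  intro j
  induction j with
  | zero => intro k _; simp [pairs]
  | succ j ih =>
      intro k hk
      obtain ⟨hpw, hlb⟩ := ih (k + 1) (by omega)
      have h12 := gp1_lt_gp2 k hk
      have h23 := gp2_lt_gp1_succ k hk
      constructor
      · simp only [pairs, List.pairwise_cons]
        refine ⟨?_, ?_, hpw⟩
        · intro x hx
          rcases List.mem_cons.mp hx with rfl | hx
          · omega
          · have := hlb x hx; omega
        · intro x hx
          have := hlb x hx; omega
      · intro x hx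
        simp only [pairs, List.mem_cons] at hx
        rcases hx with rfl | rfl | hx
        · omega
        · omega
        · have := hlb x hx; omega

theorem qSorted_eq_pairs : qSorted = pairs 1 499 := by
  unfold qSorted
  rw [buildQ_eq_pairs]
  exact PySem.List.sorted_eq_of_perm_of_pairwise_lt _ _ _ (List.Perm.refl _)
    (pairs_sorted_lb 499 1 (by omega)).1

theorem modbeq_even (k : Int) : (PySem.Int.mod (2 * k) 2 == 0) = true := by
  rw [PySem.Int.mod_eq_emod_of_pos (by omega)]
  simp [Int.mul_emod_right]

theorem modbeq_odd (k : Int) : (PySem.Int.mod (2 * k + 1) 2 == 0) = false := by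
  rw [PySem.Int.mod_eq_emod_of_pos (by omega)]
  simp

theorem sumK_stop (n : Int) (P : List Int) (fuel : Nat) (k sign r : Int)
    (h : gp1 k > n) : sumK n P fuel k sign r = r := by
  cases fuel with
  | zero => rfl
  | succ fuel =>
      unfold gp1 at h
      simp only [sumK]
      rw [if_pos h]

-- core A-side lemma: A's walk over the sorted pentagonal pairs equals the ghost per-k sum
theorem walk_eq_loop (n : Int) (P : List Int) :
    ∀ (j : Nat) (k : Int) (fuel : Nat) (s r : Int), 1 ≤ k →
      n < gp1 (k + j) →
      n + 2 - k ≤ (fuel : Int) →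
      walkA n P (pairs k j) (2 * (k - 1)) (-s) r = sumK n P fuel k s r := by
  intro j
  induction j with
  | zero =>
      intro k fuel s r hk hstop hfuel
      simp only [pairs, walkA]
      rw [sumK_stop n P fuel k s r (by simpa using hstop)]
  | succ j ih =>
      intro k fuel s r hk hstop hfuel
      have e1 : PySem.Int.floordiv (k * (3 * k - 1)) 2 = gp1 k := rfl
      have e2 : PySem.Int.floordiv (k * (3 * k + 1)) 2 = gp2 k := rfl
      have hA : walkA n P (pairs k (j + 1)) (2 * (k - 1)) (-s) r =
          if gp1 k ≤ n then
            (if gp2 k ≤ n then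
              walkA n P (pairs (k + 1) j) (2 * (k - 1) + 1 + 1) s
                (r + s * (PySem.List.pyGet? P (n - gp1 k)).getD 0 +
                  s * (PySem.List.pyGet? P (n - gp2 k)).getD 0)
             else r + s * (PySem.List.pyGet? P (n - gp1 k)).getD 0)
          else r := by
        simp only [pairs, walkA, modbeq_even (k - 1), modbeq_odd (k - 1), if_true,
          Bool.false_eq_true, if_false, neg_neg]
      rw [hA]
      by_cases h1 : gp1 k ≤ n
      · have hkn : k ≤ n := le_trans (k_le_gp1 k hk) h1
        obtain ⟨fuel, rfl⟩ : ∃ f', fuel = f' + 1 := by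
          cases fuel with
          | zero => exact absurd hfuel (by push_cast; omega)
          | succ f => exact ⟨f, rfl⟩
        have hB : sumK n P (fuel + 1) k s r =
            sumK n P fuel (k + 1) (-s)
              (if gp2 k ≤ n then
                r + s * (PySem.List.pyGet? P (n - gp1 k)).getD 0 +
                  s * (PySem.List.pyGet? P (n - gp2 k)).getD 0
               else r + s * (PySem.List.pyGet? P (n - gp1 k)).getD 0) := by
          simp only [sumK, e1, e2]
          rw [if_neg (by omega)]
        rw [hB, if_pos h1]
        by_cases h2 : gp2 k ≤ n
        · rw [if_pos h2, if_pos h2]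
          have hidx : 2 * (k - 1) + 1 + 1 = 2 * (k + 1 - 1) := by ring
          rw [hidx]
          have := ih (k + 1) fuel (-s)
            (r + s * (PySem.List.pyGet? P (n - gp1 k)).getD 0 +
              s * (PySem.List.pyGet? P (n - gp2 k)).getD 0)
            (by omega)
            (by have h' : k + 1 + (j : Int) = k + ((j : Nat) + 1 : Nat) := by push_cast; ring
                rw [h']; exact hstop)
            (by push_cast at hfuel ⊢; omega)
          rw [neg_neg] at this
          exact this
        · rw [if_neg h2, if_neg h2]
          rw [sumK_stop n P fuel (k + 1) (-s) _
            (by have := gp2_lt_gp1_succ k hk; omega)]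
      · rw [if_neg h1, sumK_stop n P fuel k s r (by omega)]

-- ----- B side -----

-- the squares of the roots 6k-1, 6k+1 are 24*gp1 k + 1 and 24*gp2 k + 1
theorem sq_gp1 (k : Int) : (6 * k - 1) * (6 * k - 1) = 24 * gp1 k + 1 := by
  have := gp1_spec k; nlinarith

theorem sq_gp2 (k : Int) : (6 * k + 1) * (6 * k + 1) = 24 * gp2 k + 1 := by
  have := gp2_spec k; nlinarith

theorem mod24_fire (g : Int) : (PySem.Int.mod (24 * g + 1 - 1) 24 == 0) = true := by
  rw [PySem.Int.mod_eq_emod_of_pos (by omega)]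
  simp [Int.mul_emod_right]

theorem mod24_skip (k : Int) : (PySem.Int.mod ((6 * k + 3) * (6 * k + 3) - 1) 24 == 0) = false := by
  obtain ⟨m, hm⟩ := Int.even_mul_succ_self k
  have he : (6 * k + 3) * (6 * k + 3) - 1 = 72 * m + 8 := by nlinarith [hm]
  rw [he, PySem.Int.mod_eq_emod_of_pos (by omega)]
  simp only [beq_eq_false_iff_ne, ne_eq]
  omega

theorem floordiv_24 (g : Int) : PySem.Int.floordiv (24 * g + 1 - 1) 24 = g := by
  rw [PySem.Int.floordiv_eq_ediv_of_pos (by omega)]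
  omega

theorem sgnK_succ (k : Int) : sgnK (k + 1) = -sgnK k := by
  unfold sgnK
  rw [PySem.Int.mod_eq_emod_of_pos (by omega : (0 : Int) < 2),
    PySem.Int.mod_eq_emod_of_pos (by omega : (0 : Int) < 2)]
  rcases Int.emod_two_eq k with h | h
  · have h1 : ((k + 1) % 2 == 1) = true := by simp; omega
    have h0 : ¬ ((k % 2 == 1) = true) := by simp; omega
    rw [if_neg h0, if_pos h1]
    norm_num
  · have h1 : ¬ (((k + 1) % 2 == 1) = true) := by simp; omega
    have h0 : ((k % 2 == 1) = true) := by simp; omega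
    rw [if_pos h0, if_neg h1]

theorem floordiv_six_gp1 (k : Int) : PySem.Int.floordiv (6 * k - 1 + 1) 6 = k := by
  rw [show (6 * k - 1 + 1) = 6 * k by ring, PySem.Int.floordiv_eq_ediv_of_pos (by omega)]
  omega

theorem floordiv_six_gp2 (k : Int) : PySem.Int.floordiv (6 * k + 1 + 1) 6 = k := by
  rw [PySem.Int.floordiv_eq_ediv_of_pos (by omega)]
  omega

-- the signed value a firing root 6k-1 / 6k+1 adds, written with sgnK
theorem fire_value (k x r : Int) :
    (if PySem.Int.mod k 2 == 1 then r + x else r - x) = r + sgnK k * x := by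
  unfold sgnK
  by_cases h : PySem.Int.mod k 2 == 1
  · rw [if_pos h, if_pos h]; ring
  · rw [if_neg h, if_neg h]; ring

-- one-step unfolding of the port's while loop (definitional)
theorem innerB_succ (n : Int) (P : List Int) (fuel : Nat) (s r : Int) :
    innerB n P (fuel + 1) s r =
      if s * s ≤ 24 * n + 1 then
        innerB n P fuel (s + 2)
          (if PySem.Int.mod (s * s - 1) 24 == 0 then
            (if PySem.Int.mod (PySem.Int.floordiv (s + 1) 6) 2 == 1 then
               r + (PySem.List.pyGet? P (n - PySem.Int.floordiv (s * s - 1) 24)).getD 0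
             else
               r - (PySem.List.pyGet? P (n - PySem.Int.floordiv (s * s - 1) 24)).getD 0)
          else r)
      else r := rfl

-- core B-side lemma: the root enumeration from s = 6k-1 equals the ghost per-k sum
theorem innerB_eq_sumK (n : Int) (P : List Int) :
    ∀ (fuelK fuelS : Nat) (k r : Int), 1 ≤ k →
      24 * n + 2 - (6 * k - 1) ≤ 2 * (fuelS : Int) →
      n + 2 - k ≤ (fuelK : Int) →
      innerB n P fuelS (6 * k - 1) r = sumK n P fuelK k (sgnK k) r := by
  intro fuelK
  induction fuelK with
  | zero =>
      intro fuelS k r hk hfS hfK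
      -- k ≥ n+2, so gp1 k > n and both sides return r immediately
      have hkg : k ≤ gp1 k := k_le_gp1 k hk
      have hstop : ¬ ((6 * k - 1) * (6 * k - 1) ≤ 24 * n + 1) := by
        rw [sq_gp1 k]
        push_cast at hfK
        omega
      cases fuelS with
      | zero => rfl
      | succ fuelS =>
          rw [innerB_succ, if_neg hstop]
          rfl
  | succ fuelK ih =>
      intro fuelS k r hk hfS hfK
      have e1 : PySem.Int.floordiv (k * (3 * k - 1)) 2 = gp1 k := rfl
      have e2 : PySem.Int.floordiv (k * (3 * k + 1)) 2 = gp2 k := rfl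
      by_cases h1 : gp1 k ≤ n
      · -- the root 6k-1 fires; at least 3 more s-steps fit in fuelS
        have hkn : k ≤ n := le_trans (k_le_gp1 k hk) h1
        obtain ⟨f, rfl⟩ : ∃ f, fuelS = f + 3 := by
          refine ⟨fuelS - 3, ?_⟩
          have : (3 : Int) ≤ (fuelS : Int) := by omega
          omega
        have hc1 : (6 * k - 1) * (6 * k - 1) ≤ 24 * n + 1 := by rw [sq_gp1 k]; omega
        have hfire1 : innerB n P (f + 3) (6 * k - 1) r =
            innerB n P (f + 2) (6 * k + 1)
              (r + sgnK k * (PySem.List.pyGet? P (n - gp1 k)).getD 0) := by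
          rw [show f + 3 = (f + 2) + 1 by ring, innerB_succ, if_pos hc1,
            show (6 * k - 1) * (6 * k - 1) = 24 * gp1 k + 1 from sq_gp1 k,
            mod24_fire, if_pos rfl, floordiv_24, floordiv_six_gp1, fire_value,
            show (6 * k - 1 + 2) = 6 * k + 1 by ring]
        rw [hfire1]
        by_cases h2 : gp2 k ≤ n
        · -- the root 6k+1 fires too, then 6k+3 is filtered out, recurse at k+1
          have hc2 : (6 * k + 1) * (6 * k + 1) ≤ 24 * n + 1 := by rw [sq_gp2 k]; omega
          have hfire2 : innerB n P (f + 2) (6 * k + 1)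
                (r + sgnK k * (PySem.List.pyGet? P (n - gp1 k)).getD 0) =
              innerB n P (f + 1) (6 * k + 3)
                (r + sgnK k * (PySem.List.pyGet? P (n - gp1 k)).getD 0 +
                  sgnK k * (PySem.List.pyGet? P (n - gp2 k)).getD 0) := by
            rw [show f + 2 = (f + 1) + 1 by ring, innerB_succ, if_pos hc2,
              show (6 * k + 1) * (6 * k + 1) = 24 * gp2 k + 1 from sq_gp2 k,
              mod24_fire, if_pos rfl, floordiv_24, floordiv_six_gp2, fire_value,
              show (6 * k + 1 + 2) = 6 * k + 3 by ring]
          rw [hfire2]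
          have hskip : innerB n P (f + 1) (6 * k + 3)
                (r + sgnK k * (PySem.List.pyGet? P (n - gp1 k)).getD 0 +
                  sgnK k * (PySem.List.pyGet? P (n - gp2 k)).getD 0) =
              innerB n P f (6 * (k + 1) - 1)
                (r + sgnK k * (PySem.List.pyGet? P (n - gp1 k)).getD 0 +
                  sgnK k * (PySem.List.pyGet? P (n - gp2 k)).getD 0) := by
            rw [innerB_succ]
            by_cases hc3 : (6 * k + 3) * (6 * k + 3) ≤ 24 * n + 1
            · rw [if_pos hc3, mod24_skip,
                show (6 * k + 3 + 2) = 6 * (k + 1) - 1 by ring]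
              simp
            · -- the loop stops at 6k+3; so does the recursion at k+1 (both return r')
              rw [if_neg hc3]
              have hstop' : ¬ ((6 * (k + 1) - 1) * (6 * (k + 1) - 1) ≤ 24 * n + 1) := by
                intro hc
                apply hc3
                nlinarith [hc]
              cases f with
              | zero => rfl
              | succ f' =>
                  rw [innerB_succ, if_neg hstop']
          rw [hskip]
          have hIH := ih f (k + 1)
            (r + sgnK k * (PySem.List.pyGet? P (n - gp1 k)).getD 0 +
              sgnK k * (PySem.List.pyGet? P (n - gp2 k)).getD 0)
            (by omega) (by push_cast at hfS ⊢; omega) (by push_cast at hfK ⊢; omega)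
          rw [hIH, sgnK_succ]
          simp only [sumK, e1, e2]
          rw [if_neg (by omega), if_pos h2]
        · -- the root 6k+1 does not fire (gp2 k > n): the loop stops there, as does sumK at k+1
          have hc2 : ¬ ((6 * k + 1) * (6 * k + 1) ≤ 24 * n + 1) := by
            rw [sq_gp2 k]; omega
          have hstopB : innerB n P (f + 2) (6 * k + 1)
                (r + sgnK k * (PySem.List.pyGet? P (n - gp1 k)).getD 0) =
              r + sgnK k * (PySem.List.pyGet? P (n - gp1 k)).getD 0 := by
            rw [show f + 2 = (f + 1) + 1 by ring, innerB_succ, if_neg hc2]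
          rw [hstopB]
          simp only [sumK, e1, e2]
          rw [if_neg (by omega), if_neg (by omega),
            sumK_stop n P fuelK (k + 1) _ _ (by have := gp2_lt_gp1_succ k hk; omega)]
      · -- gp1 k > n: both sides return r
        push_neg at h1
        have hstop : ¬ ((6 * k - 1) * (6 * k - 1) ≤ 24 * n + 1) := by
          rw [sq_gp1 k]; omega
        cases fuelS with
        | zero =>
            rw [sumK_stop n P (fuelK + 1) k _ r (by omega)]
            rfl
        | succ fuelS =>
            rw [innerB_succ, if_neg hstop, sumK_stop n P (fuelK + 1) k _ r (by omega)]

-- B's inner root enumeration equals the ghost per-k sum (instantiated at k = 1, s = 5)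
theorem innerB_eq_loop (n : Int) (P : List Int) (hn : 1 ≤ n) :
    innerB n P (12 * n.toNat + 1) 5 0 = sumK n P (n.toNat + 2) 1 1 0 := by
  have hsgn1 : sgnK 1 = 1 := by decide
  have := innerB_eq_sumK n P (n.toNat + 2) (12 * n.toNat + 1) 1 0 (by omega)
    (by push_cast; omega) (by push_cast; omega)
  rw [hsgn1] at this
  simpa using this

-- the two outer loops agree step by step while n stays within A's table (n ≤ 373750)
theorem outer_eq (d : Int) :
    ∀ (fuel : Nat) (n : Int) (P : List Int), 1 ≤ n → n + fuel ≤ 373751 →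
      outerA d (pairs 1 499) fuel n P = outerB d fuel n P := by
  intro fuel
  induction fuel with
  | zero => intro n P _ _; rfl
  | succ fuel ih =>
      intro n P hn hbound
      have h500 : (1 : Int) + ((499 : Nat) : Int) = 500 := by norm_num
      have hwalk : walkA n P (pairs 1 499) 0 (-1) 0 = sumK n P (n.toNat + 2) 1 1 0 := by
        have := walk_eq_loop n P 499 1 (n.toNat + 2) 1 0 (by omega)
          (by rw [h500]; have := gp1_spec 500; push_cast at hbound; omega)
          (by push_cast; omega)
        simpa using this
      have hinner : walkA n P (pairs 1 499) 0 (-1) 0 = innerB n P (12 * n.toNat + 1) 5 0 :=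
        hwalk.trans (innerB_eq_loop n P hn).symm
      simp only [outerA, outerB, ← hinner]
      by_cases hmod : (PySem.Int.mod (walkA n P (pairs 1 499) 0 (-1) 0) d == 0) = true
      · rw [if_pos hmod, if_pos hmod]
      · rw [if_neg hmod, if_neg hmod]
        exact ih (n + 1) _ (by omega) (by push_cast at hbound ⊢; omega)

-- ===== VERDICT (by name: the statement is the Claim_ definition above) =====
theorem Solve_spec : Claim_equal_Solve := by
  intro divisor _ _
  unfold Spec_Solve Solve Solve_alt
  rw [qSorted_eq_pairs]
  exact outer_eq divisor 373750 1 [1] (by omega) (by omega)
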